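-- pv_equiv track=rewrite | github.com/miliar/Code_Jam_Webscraper | solutions_python/solutions_year16_round0_nr3/2830.py | baseconvo
-- ===== SOURCE A (Python) =====
-- def baseconvo(n,b):
--     num=0
--     mul=1
--     while(n!=0):
--         num=num+n%10*mul
--         n=n//10
--         mul=mul*b
--     return  num
-- ===== SOURCE B (Python) =====
-- def baseconvo(n, b):
--     num = 0
--     for d in str(n):
--         num = num * b + (ord(d) - 48)
--     return num
-- ===== Notes on version B (the rewrite author's own statement) =====
-- stated objective: idiomatic
-- what changed: B folds the decimal digit string of n with Horner's rule most-significant-first instead of A's least-significant-first divmod loop with a separate power accumulator.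
import Mathlib
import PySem

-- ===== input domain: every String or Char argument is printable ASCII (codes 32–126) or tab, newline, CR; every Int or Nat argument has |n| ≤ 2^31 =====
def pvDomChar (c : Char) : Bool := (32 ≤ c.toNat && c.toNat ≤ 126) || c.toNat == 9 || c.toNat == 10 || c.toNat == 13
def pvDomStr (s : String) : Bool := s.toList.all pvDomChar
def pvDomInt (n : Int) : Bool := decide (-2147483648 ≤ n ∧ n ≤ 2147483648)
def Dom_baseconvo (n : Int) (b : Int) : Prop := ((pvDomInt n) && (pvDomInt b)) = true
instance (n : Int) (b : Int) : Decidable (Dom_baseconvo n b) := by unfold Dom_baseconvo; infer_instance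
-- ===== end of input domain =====

-- B reads the decimal digits of n most-significant-first from str(n) and folds them with
-- Horner's rule, instead of A's least-significant-first divmod loop with a power accumulator.
-- Equivalence is claimed for 0 ≤ n (Pre_): on negative n Python A never terminates.

-- ===== PORT A =====
-- while(n!=0): num += n%10*mul; n //= 10; mul *= b
-- fuel n.toNat+1 only totalizes the loop (enough for every n ≥ 0, since n//10 < n;
-- for n < 0 the Python loop never terminates — those inputs are outside Pre_)
def baseconvoLoop (b : Int) : Nat → Int → Int → Int → Int
  | 0, _, num, _ => num
  | f + 1, n, num, mul =>
    if n = 0 then num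
    else baseconvoLoop b f (PySem.Int.floordiv n 10) (num + PySem.Int.mod n 10 * mul) (mul * b)

def baseconvo (n : Int) (b : Int) : Int := baseconvoLoop b (n.toNat + 1) n 0 1

-- ===== PORT B =====
-- for d in str(n): num = num*b + (ord(d) - 48)   ; ord(d)-48 ported as (c.toNat : Int) - 48 (exact)
def baseconvo_alt (n : Int) (b : Int) : Int :=
  (PySem.Int.toStr n).toList.foldl (fun num c => num * b + ((c.toNat : Int) - 48)) 0

-- ===== PRECONDITION & SPEC =====
-- Pre_: 0 ≤ n — on negative n the Python A loops forever (n//10 floors, never reaching 0).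
def Pre_baseconvo (n : Int) (b : Int) : Prop := 0 ≤ n
instance (n : Int) (b : Int) : Decidable (Pre_baseconvo n b) := by unfold Pre_baseconvo; infer_instance
def pvWitness_baseconvo : Int × Int := (2016, 7)

def Spec_baseconvo (n : Int) (b : Int) (out : Int) : Prop := out = baseconvo_alt n b
instance (n : Int) (b : Int) (out : Int) : Decidable (Spec_baseconvo n b out) := by unfold Spec_baseconvo; infer_instance

-- ===== CLAIM (what is proved, stated in full; the proofs are below) =====
def Claim_equal_baseconvo : Prop := ∀ (n : Int) (b : Int), Dom_baseconvo n b → Pre_baseconvo n b → Spec_baseconvo n b (baseconvo n b)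

-- ===== LEMMAS AND PROOFS =====

-- the value both programs compute: little-endian decimal digits of m re-weighted with powers of b
def pvConv (b : Int) (m : Nat) : Int :=
  if m = 0 then 0 else (m % 10 : Nat) + b * pvConv b (m / 10)
decreasing_by omega

-- A's loop invariant
theorem pvLoopA_eq (b : Int) (f : Nat) : ∀ (m : Nat), m < f → ∀ (num mul : Int),
    baseconvoLoop b f (m : Int) num mul = num + mul * pvConv b m := by
  induction f with
  | zero => intro m hm; omega
  | succ f ih =>
    intro m hm num mul
    rw [baseconvoLoop, pvConv]
    by_cases h0 : m = 0
    · simp [h0]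
    · have hm' : ¬ ((m : Int) = 0) := by exact_mod_cast h0
      rw [if_neg hm', if_neg h0]
      rw [show PySem.Int.floordiv (m : Int) 10 = ((m / 10 : Nat) : Int) from
            PySem.Int.floordiv_natCast m 10,
          show PySem.Int.mod (m : Int) 10 = ((m % 10 : Nat) : Int) from
            PySem.Int.mod_natCast m 10]
      rw [ih (m / 10) (by omega)]
      ring

-- digitChar of a digit, read back as ord - 48
theorem pvDigitChar_val (r : Nat) (hr : r < 10) :
    ((Nat.digitChar r).toNat : Int) - 48 = (r : Int) := by
  interval_cases r <;> decide

-- toDigitsCore flushes its accumulator on the right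
theorem pvToDigitsCore_append (f : Nat) : ∀ (m : Nat) (l : List Char),
    Nat.toDigitsCore 10 f m l = Nat.toDigitsCore 10 f m [] ++ l := by
  induction f with
  | zero => intro m l; simp [Nat.toDigitsCore]
  | succ f ih =>
    intro m l
    simp only [Nat.toDigitsCore]
    by_cases h : m / 10 = 0
    · simp [h]
    · rw [if_neg h, if_neg h, ih (m / 10) (Nat.digitChar (m % 10) :: l),
          ih (m / 10) [Nat.digitChar (m % 10)]]
      simp

-- Horner over the big-endian digit characters equals pvConv
theorem pvHorner_toDigitsCore (b : Int) (f : Nat) : ∀ (m : Nat), m < f →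
    (Nat.toDigitsCore 10 f m []).foldl (fun num c => num * b + ((c.toNat : Int) - 48)) 0
      = pvConv b m := by
  induction f with
  | zero => intro m hm; omega
  | succ f ih =>
    intro m hm
    simp only [Nat.toDigitsCore]
    by_cases h : m / 10 = 0
    · have hlt : m < 10 := by omega
      rw [if_pos h]
      simp only [List.foldl]
      rw [pvDigitChar_val (m % 10) (by omega)]
      rw [pvConv]
      by_cases h0 : m = 0
      · simp [h0]
      · rw [if_neg h0, h, pvConv]
        simp
    · rw [if_neg h, pvToDigitsCore_append, List.foldl_append]
      simp only [List.foldl]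
      rw [ih (m / 10) (by omega), pvDigitChar_val (m % 10) (by omega)]
      conv_rhs => rw [pvConv]
      rw [if_neg (by omega)]
      ring

theorem pvAlt_eq (b : Int) (m : Nat) : baseconvo_alt (m : Int) b = pvConv b m := by
  unfold baseconvo_alt
  rw [PySem.Int.toList_toStr]
  have hnn : ¬ ((m : Int) < 0) := by omega
  simp only [PySem.Int.toChars, if_neg hnn, Int.toNat_natCast]
  exact pvHorner_toDigitsCore b (m + 1) m (by omega)

-- ===== VERDICT (by name: the statement is the Claim_ definition above) =====
theorem baseconvo_spec : Claim_equal_baseconvo := by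
  intro n b _ hpre
  unfold Spec_baseconvo baseconvo
  obtain ⟨m, rfl⟩ := Int.eq_ofNat_of_zero_le hpre
  rw [show ((m : Int).toNat + 1) = m + 1 from by omega,
      pvLoopA_eq b (m + 1) m (by omega), pvAlt_eq]
  ring
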